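-- pv_equiv track=rewrite | github.com/Aaryansh7/research-base-remote | backend/headers/xbrlprocesscheck.py | find_latest_tuple_by_string
-- ===== SOURCE A (Python) =====
-- def find_latest_tuple_by_string(data_list, search_string_list):
--     search_string = None
--
--     for search_element in search_string_list:
--         for main_tuple in data_list:
--             if main_tuple[0] == search_element: # Directly compare the concept string
--                 search_string = search_element
--                 break
--         if search_string:
--                 break
--
--     latest_tuple = None
--
--     if search_string is None: # If no search string found, return None
--         return None
--
--     for current_tuple in data_list:
--         str_value, num_value, dt_object = current_tuple
--
--         if str_value == search_string:
--             if latest_tuple is None: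
--                 latest_tuple = current_tuple
--             else:
--                 _, _, latest_dt_object = latest_tuple
--                 if dt_object > latest_dt_object:
--                     latest_tuple = current_tuple
--
--     return latest_tuple
-- ===== SOURCE B (Python) =====
-- def find_latest_tuple_by_string(data_list, search_string_list):
--     # One pass: index each str_value to its latest-dated tuple (first wins on ties),
--     # then return the entry for the first search string present in the index.
--     latest = {}
--     for t in data_list:
--         cur = latest.get(t[0])
--         if cur is None or t[2] > cur[2]:
--             latest[t[0]] = t
--     for s in search_string_list:
--         if s in latest:
--             return latest[s]
--     return None
-- ===== Notes on version B (the rewrite author's own statement) =====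
-- stated objective: faster
-- what changed: Replaces the per-search-string scans and the second full scan with a single pass that builds a dict mapping each str_value to its latest-dated tuple, followed by a lookup over the search strings.
-- intended difference: On inputs whose first search string with a match in data_list is the empty string while a later search string also matches, A's truthy 'if search_string:' skips the empty-string match and A returns the latest tuple of the later nonempty search string, whereas B returns the empty string's latest tuple, honouring first-match-wins search order as intended. — e.g. on find_latest_tuple_by_string([("", 1, 1), ("a", 2, 2)], ["", "a"]): A returns some ("a", 2, 2), B returns some ("", 1, 1)
import Mathlib
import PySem

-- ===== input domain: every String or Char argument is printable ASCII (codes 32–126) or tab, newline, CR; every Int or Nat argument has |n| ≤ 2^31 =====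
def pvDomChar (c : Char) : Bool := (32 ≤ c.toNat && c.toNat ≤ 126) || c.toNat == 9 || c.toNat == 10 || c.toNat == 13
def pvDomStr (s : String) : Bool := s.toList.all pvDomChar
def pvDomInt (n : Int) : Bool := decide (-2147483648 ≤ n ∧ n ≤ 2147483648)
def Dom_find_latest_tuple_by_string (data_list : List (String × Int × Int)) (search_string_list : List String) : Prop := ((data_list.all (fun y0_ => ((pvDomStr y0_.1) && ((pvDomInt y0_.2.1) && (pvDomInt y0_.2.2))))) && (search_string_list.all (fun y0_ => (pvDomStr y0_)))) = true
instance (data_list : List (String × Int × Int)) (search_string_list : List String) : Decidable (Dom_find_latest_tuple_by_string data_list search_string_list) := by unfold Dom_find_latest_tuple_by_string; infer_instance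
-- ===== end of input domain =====

-- B builds a str_value → latest-tuple dict in one pass then looks up the search strings in order
-- (faster in a timing run: one pass over data_list instead of repeated scans); A's truthy
-- 'if search_string:' skip of an empty-string match is stated as an intended difference D_ below.

-- ===== PORT A =====
-- phase 1: the nested search loops; state 'ss' is the Python variable search_string
def pvFindStr (ss : Option String) (search : List String) (data : List (String × Int × Int)) : Option String :=
  match search with
  | [] => ss
  | s :: rest =>
    let ss' := if data.any (fun t => t.1 == s) then some s else ss
    match ss' with
    | some str => if str = "" then pvFindStr ss' rest data else ss'
    | none => pvFindStr ss' rest data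

-- phase 2: the latest_tuple loop for the found search_string
def pvLatest (s : String) (latest : Option (String × Int × Int)) (data : List (String × Int × Int)) : Option (String × Int × Int) :=
  match data with
  | [] => latest
  | t :: rest =>
    if t.1 = s then
      match latest with
      | none => pvLatest s (some t) rest
      | some l => if t.2.2 > l.2.2 then pvLatest s (some t) rest else pvLatest s latest rest
    else pvLatest s latest rest

def find_latest_tuple_by_string (data_list : List (String × Int × Int)) (search_string_list : List String) : Option (String × Int × Int) :=
  match pvFindStr none search_string_list data_list with
  | none => none
  | some s => pvLatest s none data_list

-- ===== PORT B =====
-- build the str_value → latest-dated-tuple index in one pass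
def pvBuild (d : PySem.Dict String (String × Int × Int)) (data : List (String × Int × Int)) : PySem.Dict String (String × Int × Int) :=
  match data with
  | [] => d
  | t :: rest =>
    match d.get? t.1 with
    | none => pvBuild (d.insert t.1 t) rest
    | some c => if t.2.2 > c.2.2 then pvBuild (d.insert t.1 t) rest else pvBuild d rest

-- return the index entry of the first search string present in the index
def pvLookup (d : PySem.Dict String (String × Int × Int)) (search : List String) : Option (String × Int × Int) :=
  match search with
  | [] => none
  | s :: rest =>
    match d.get? s with
    | some t => some t
    | none => pvLookup d rest

def find_latest_tuple_by_string_alt (data_list : List (String × Int × Int)) (search_string_list : List String) : Option (String × Int × Int) :=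
  pvLookup (pvBuild PySem.Dict.empty data_list) search_string_list

-- ===== PRECONDITION & SPEC =====
-- On inputs whose first search string matching data_list is "" while a later search string also
-- matches, A's truthy 'if search_string:' skips the empty-string match and A returns the later
-- nonempty string's latest tuple, whereas B returns ""'s latest tuple, honouring first-match-wins
-- search order as intended.
def D_find_latest_tuple_by_string (data_list : List (String × Int × Int)) (search_string_list : List String) : Prop :=
  search_string_list.find? (fun s => data_list.any (fun t => t.1 == s)) = some "" ∧
  search_string_list.any (fun s => s ≠ "" && data_list.any (fun t => t.1 == s)) = true
instance (data_list : List (String × Int × Int)) (search_string_list : List String) : Decidable (D_find_latest_tuple_by_string data_list search_string_list) := by unfold D_find_latest_tuple_by_string; infer_instance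

def Spec_find_latest_tuple_by_string (data_list : List (String × Int × Int)) (search_string_list : List String) (out : Option (String × Int × Int)) : Prop := ¬ D_find_latest_tuple_by_string data_list search_string_list → out = find_latest_tuple_by_string_alt data_list search_string_list
instance (data_list : List (String × Int × Int)) (search_string_list : List String) (out : Option (String × Int × Int)) : Decidable (Spec_find_latest_tuple_by_string data_list search_string_list out) := by unfold Spec_find_latest_tuple_by_string; infer_instance

def pvDiffWitness_find_latest_tuple_by_string : (List (String × Int × Int)) × List String := ([("", 1, 1), ("a", 2, 2)], ["", "a"])
def pvDiffWitnessOut_find_latest_tuple_by_string : (Option (String × Int × Int)) × (Option (String × Int × Int)) := (some ("a", 2, 2), some ("", 1, 1))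

-- ===== CLAIM (what is proved, stated in full; the proofs are below) =====
def Claim_unchanged_find_latest_tuple_by_string : Prop := ∀ (data_list : List (String × Int × Int)) (search_string_list : List String), Dom_find_latest_tuple_by_string data_list search_string_list → Spec_find_latest_tuple_by_string data_list search_string_list (find_latest_tuple_by_string data_list search_string_list)
def Claim_changed_find_latest_tuple_by_string : Prop := Dom_find_latest_tuple_by_string (pvDiffWitness_find_latest_tuple_by_string.1) (pvDiffWitness_find_latest_tuple_by_string.2) ∧ D_find_latest_tuple_by_string (pvDiffWitness_find_latest_tuple_by_string.1) (pvDiffWitness_find_latest_tuple_by_string.2) ∧ find_latest_tuple_by_string (pvDiffWitness_find_latest_tuple_by_string.1) (pvDiffWitness_find_latest_tuple_by_string.2) = pvDiffWitnessOut_find_latest_tuple_by_string.1 ∧ find_latest_tuple_by_string_alt (pvDiffWitness_find_latest_tuple_by_string.1) (pvDiffWitness_find_latest_tuple_by_string.2) = pvDiffWitnessOut_find_latest_tuple_by_string.2 ∧ pvDiffWitnessOut_find_latest_tuple_by_string.1 ≠ pvDiffWitnessOut_find_latest_tuple_by_string.2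
def Claim_exact_find_latest_tuple_by_string : Prop := ∀ (data_list : List (String × Int × Int)) (search_string_list : List String), Dom_find_latest_tuple_by_string data_list search_string_list → D_find_latest_tuple_by_string data_list search_string_list → find_latest_tuple_by_string data_list search_string_list ≠ find_latest_tuple_by_string_alt data_list search_string_list

-- ===== LEMMAS AND PROOFS =====

-- the dict built by B answers, for each key s, exactly A's phase-2 fold for s
theorem get?_pvBuild (data : List (String × Int × Int)) (d : PySem.Dict String (String × Int × Int)) (s : String) :
    (pvBuild d data).get? s = pvLatest s (d.get? s) data := by
  induction data generalizing d with
  | nil => rfl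
  | cons t rest ih =>
    simp only [pvBuild, pvLatest]
    by_cases hts : t.1 = s
    · subst hts
      cases hd : d.get? t.1 with
      | none => simp [ih, PySem.Dict.get?_insert_self]
      | some c =>
        by_cases hgt : t.2.2 > c.2.2
        · simp [hgt, ih, PySem.Dict.get?_insert_self]
        · simp [hgt, ih, hd]
    · cases hd : d.get? t.1 with
      | none => simp [hts, ih, PySem.Dict.get?_insert (d := d), Ne.symm hts]
      | some c =>
        by_cases hgt : t.2.2 > c.2.2
        · simp [hts, hgt, ih, PySem.Dict.get?_insert (d := d), Ne.symm hts]
        · simp [hts, hgt, ih]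

-- phase 2 started from some is always some
theorem pvLatest_some (s : String) (l : String × Int × Int) (data : List (String × Int × Int)) :
    (pvLatest s (some l) data).isSome = true := by
  induction data generalizing l with
  | nil => rfl
  | cons t rest ih =>
    simp only [pvLatest]
    by_cases hts : t.1 = s
    · by_cases hgt : t.2.2 > l.2.2 <;> simp [hts, hgt, ih]
    · simp [hts, ih]

-- phase 2 returns none iff no tuple matches
theorem pvLatest_none_iff (s : String) (data : List (String × Int × Int)) :
    pvLatest s none data = none ↔ data.any (fun t => t.1 == s) = false := by
  induction data with
  | nil => simp [pvLatest]
  | cons t rest ih =>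
    simp only [pvLatest, List.any_cons]
    by_cases hts : t.1 = s
    · simp only [hts, beq_self_eq_true, Bool.true_or, reduceIte]
      constructor
      · intro h
        have h2 := pvLatest_some s t rest
        rw [h] at h2
        exact absurd h2 (by simp)
      · intro h
        exact absurd h (by simp)
    · simp [hts, ih]

-- any value returned by phase 2 has first component s
theorem pvLatest_fst (s : String) (acc : Option (String × Int × Int)) (data : List (String × Int × Int))
    (hacc : ∀ l, acc = some l → l.1 = s) :
    ∀ t, pvLatest s acc data = some t → t.1 = s := by
  induction data generalizing acc with
  | nil => intro t h; exact hacc t h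
  | cons u rest ih =>
    intro t h
    simp only [pvLatest] at h
    by_cases hus : u.1 = s
    · cases hc : acc with
      | none =>
        simp only [hc, if_pos hus] at h
        exact ih (some u) (by intro l hl; cases hl; exact hus) t h
      | some l =>
        simp only [hc, if_pos hus] at h
        by_cases hgt : u.2.2 > l.2.2
        · simp only [if_pos hgt] at h
          exact ih (some u) (by intro l' hl'; cases hl'; exact hus) t h
        · simp only [if_neg hgt] at h
          exact ih (some l) (by intro l' hl'; cases hl'; exact hacc l hc) t h
    · simp only [if_neg hus] at h
      exact ih acc hacc t h

-- B's lookup pass returns the dict entry of the first matching search string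
theorem pvLookup_find (search : List String) (data : List (String × Int × Int)) (s0 : String)
    (h : search.find? (fun s => data.any (fun t => t.1 == s)) = some s0) :
    pvLookup (pvBuild PySem.Dict.empty data) search = pvLatest s0 none data := by
  induction search with
  | nil => simp at h
  | cons u rest ih =>
    simp only [pvLookup]
    rw [get?_pvBuild, PySem.Dict.get?_empty]
    by_cases hp : data.any (fun t => t.1 == u) = true
    · rw [List.find?_cons_of_pos (p := fun s => data.any fun t => t.1 == s) hp] at h
      cases h
      cases hL : pvLatest s0 none data with
      | none => exact absurd ((pvLatest_none_iff s0 data).mp hL) (by rw [hp]; simp)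
      | some t => rfl
    · rw [List.find?_cons_of_neg (p := fun s => data.any fun t => t.1 == s) hp] at h
      have hL : pvLatest u none data = none :=
        (pvLatest_none_iff u data).mpr ((Bool.not_eq_true _) ▸ hp)
      rw [hL]
      exact ih h

-- if no nonempty matching search string remains, phase 1 keeps returning some ""
theorem pvFindStr_stay_empty (search : List String) (data : List (String × Int × Int))
    (h : ∀ s ∈ search, data.any (fun t => t.1 == s) = true → s = "") :
    pvFindStr (some "") search data = some "" := by
  induction search with
  | nil => rfl
  | cons s rest ih =>
    simp only [pvFindStr]
    by_cases hm : data.any (fun t => t.1 == s) = true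
    · have hs : s = "" := h s (List.mem_cons_self ..) hm
      subst hs
      simp only [hm, reduceIte]
      exact ih (fun s' hs' => h s' (List.mem_cons_of_mem _ hs'))
    · simp only [if_neg hm, reduceIte]
      exact ih (fun s' hs' => h s' (List.mem_cons_of_mem _ hs'))

-- if some nonempty search string matches, phase 1 returns a nonempty matching string
theorem pvFindStr_nonempty (search : List String) (data : List (String × Int × Int)) (ss : Option String)
    (hss : ss = none ∨ ss = some "")
    (h : ∃ s ∈ search, s ≠ "" ∧ data.any (fun t => t.1 == s) = true) :
    ∃ s', pvFindStr ss search data = some s' ∧ s' ≠ "" ∧ data.any (fun t => t.1 == s') = true := by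
  induction search generalizing ss with
  | nil => obtain ⟨s, hs, _⟩ := h; exact absurd hs (List.not_mem_nil)
  | cons s rest ih =>
    have htail : (¬ data.any (fun t => t.1 == s) = true ∨ s = "") →
        ∃ u ∈ rest, u ≠ "" ∧ data.any (fun t => t.1 == u) = true := by
      intro hc
      obtain ⟨u, hu, hune, hum⟩ := h
      rcases List.mem_cons.mp hu with h1 | h1
      · subst h1
        rcases hc with hc | hc
        · exact absurd hum hc
        · exact absurd hc hune
      · exact ⟨u, h1, hune, hum⟩
    simp only [pvFindStr]
    by_cases hm : data.any (fun t => t.1 == s) = true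
    · by_cases hse : s = ""
      · subst hse
        simp only [hm, reduceIte]
        exact ih (some "") (Or.inr rfl) (htail (Or.inr rfl))
      · simp only [hm, reduceIte, if_neg hse]
        exact ⟨s, rfl, hse, hm⟩
    · simp only [if_neg hm]
      rcases hss with hc | hc <;> subst hc
      · exact ih none (Or.inl rfl) (htail (Or.inl hm))
      · simp only [reduceIte]
        exact ih (some "") (Or.inr rfl) (htail (Or.inl hm))

-- core agreement, by induction over the search list
theorem main_agree (data : List (String × Int × Int)) (search : List String)
    (hD : ¬ D_find_latest_tuple_by_string data search) :
    find_latest_tuple_by_string data search = find_latest_tuple_by_string_alt data search := by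
  induction search with
  | nil => rfl
  | cons s rest ih =>
    simp only [find_latest_tuple_by_string, find_latest_tuple_by_string_alt, pvFindStr, pvLookup]
    rw [get?_pvBuild, PySem.Dict.get?_empty]
    by_cases hm : data.any (fun t => t.1 == s) = true
    · simp only [hm, reduceIte]
      by_cases hse : s = ""
      · subst hse
        simp only [reduceIte]
        have hfind : ("" :: rest).find? (fun s => data.any (fun t => t.1 == s)) = some "" :=
          List.find?_cons_of_pos (p := fun s => data.any fun t => t.1 == s) hm
        have hnon : ∀ u ∈ ("" :: rest : List String), data.any (fun t => t.1 == u) = true → u = "" := by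
          intro u hu hum
          by_contra hune
          exact hD ⟨hfind, by simp only [List.any_eq_true]; exact ⟨u, hu, by simp [hune, hum]⟩⟩
        have h1 : pvFindStr (some "") rest data = some "" :=
          pvFindStr_stay_empty rest data (fun u hu => hnon u (List.mem_cons_of_mem _ hu))
        rw [h1]
        cases hL : pvLatest "" none data with
        | none => exact absurd ((pvLatest_none_iff "" data).mp hL) (by rw [hm]; simp)
        | some t => exact hL
      · simp only [if_neg hse]
        cases hL : pvLatest s none data with
        | none => exact absurd ((pvLatest_none_iff s data).mp hL) (by rw [hm]; simp)
        | some t => simp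
    · simp only [if_neg hm]
      have hL : pvLatest s none data = none :=
        (pvLatest_none_iff s data).mpr ((Bool.not_eq_true _) ▸ hm)
      rw [hL]
      exact ih (by
        intro ⟨hf, ha⟩
        apply hD
        constructor
        · exact (List.find?_cons_of_neg (p := fun s => data.any fun t => t.1 == s) hm).trans hf
        · simp only [List.any_eq_true] at ha ⊢
          obtain ⟨u, hu, h2⟩ := ha
          exact ⟨u, List.mem_cons_of_mem _ hu, h2⟩)

-- ===== VERDICT (by name: the statement is the Claim_ definition above) =====
theorem find_latest_tuple_by_string_spec : Claim_unchanged_find_latest_tuple_by_string := by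
  intro data search _ hD
  exact main_agree data search hD

theorem find_latest_tuple_by_string_changed : Claim_changed_find_latest_tuple_by_string := by
  unfold Claim_changed_find_latest_tuple_by_string; decide

theorem find_latest_tuple_by_string_tight : Claim_exact_find_latest_tuple_by_string := by
  intro data search _ hD heq
  obtain ⟨hfind, hnon⟩ := hD
  -- B returns the ""-keyed latest tuple, whose first component is ""
  have hBmatch : data.any (fun t => t.1 == "") = true := by
    have := List.find?_some hfind
    simpa using this
  have hB : find_latest_tuple_by_string_alt data search = pvLatest "" none data :=
    pvLookup_find search data "" hfind
  obtain ⟨tB, htB⟩ : ∃ tB, pvLatest "" none data = some tB := by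
    cases hL : pvLatest "" none data with
    | none => exact absurd ((pvLatest_none_iff "" data).mp hL) (by rw [hBmatch]; simp)
    | some t => exact ⟨t, rfl⟩
  have htB1 : tB.1 = "" := pvLatest_fst "" none data (by intro l hl; cases hl) tB htB
  -- A returns a nonempty search string's latest tuple, whose first component is nonempty
  obtain ⟨sA, hsA, hsAne, hsAm⟩ := pvFindStr_nonempty search data none (Or.inl rfl) (by
    simp only [List.any_eq_true] at hnon
    obtain ⟨u, hu, h2⟩ := hnon
    simp only [Bool.and_eq_true, decide_eq_true_eq] at h2
    exact ⟨u, hu, h2.1, h2.2⟩)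
  have hA : find_latest_tuple_by_string data search = pvLatest sA none data := by
    simp only [find_latest_tuple_by_string, hsA]
  obtain ⟨tA, htA⟩ : ∃ tA, pvLatest sA none data = some tA := by
    cases hL : pvLatest sA none data with
    | none => exact absurd ((pvLatest_none_iff sA data).mp hL) (by rw [hsAm]; simp)
    | some t => exact ⟨t, rfl⟩
  have htA1 : tA.1 = sA := pvLatest_fst sA none data (by intro l hl; cases hl) tA htA
  rw [hA, htA, hB, htB] at heq
  cases heq
  exact hsAne (htA1 ▸ htB1)
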